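-- pv_equiv track=rewrite | github.com/Euro-BioImaging/EuBI-Bridge | eubi_bridge/conversion/fileset_io.py | find_consensus_sequence
-- ===== SOURCE A (Python) =====
-- from typing import Dict, Iterable, List, Union
--
-- def find_consensus_sequence(strings: List[str]) -> tuple:
--     """
--     Find consensus sequence using column-based majority voting.
--
--     Pads all strings to the same length with '_', then identifies
--     which positions have differing characters across the strings.
--
--     Args:
--         strings: List of strings to find consensus from
--
--     Returns:
--         (consensus_str, variable_positions_list): Consensus string and list of
--         positions where characters differ
--     """
--     if not strings:
--         return '', []
--
--     max_len = max(len(s) for s in strings)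
--     padded_strings = [s.ljust(max_len, '_') for s in strings]
--
--     consensus_chars = []
--     variable_positions = []
--
--     for pos in range(max_len):
--         chars_at_pos = [s[pos] for s in padded_strings]
--
--         # Find most common character (majority voting)
--         char_counts = {}
--         for ch in chars_at_pos:
--             char_counts[ch] = char_counts.get(ch, 0) + 1
--
--         most_common = max(char_counts.items(), key=lambda x: x[1])[0]
--         consensus_chars.append(most_common)
--
--         # Check if all characters at this position are the same
--         if len(set(chars_at_pos)) > 1:
--             variable_positions.append(pos)
--
--     return ''.join(consensus_chars), variable_positions
-- ===== SOURCE B (Python) =====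
-- def find_consensus_sequence(strings):
--     """Row-major single pass: maintain one count-dict per column while scanning
--     the strings once, instead of re-scanning all strings for every column."""
--     if not strings:
--         return '', []
--     max_len = max(map(len, strings))
--     counts = [{} for _ in range(max_len)]
--     for s in strings:
--         for i, ch in enumerate(s.ljust(max_len, '_')):
--             d = counts[i]
--             d[ch] = d.get(ch, 0) + 1
--     consensus = ''.join(max(d, key=d.get) for d in counts)
--     variable_positions = [i for i, d in enumerate(counts) if len(d) > 1]
--     return consensus, variable_positions
-- ===== Notes on version B (the rewrite author's own statement) =====
-- stated objective: alternative
-- what changed: Replaces A's column-major loop (for each position, re-scan all padded strings, build a fresh per-column dict and a set) by a single row-major pass over the strings that maintains one insertion-ordered count dict per column, reading consensus chars and variable positions off those dicts afterwards.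
import Mathlib
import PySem

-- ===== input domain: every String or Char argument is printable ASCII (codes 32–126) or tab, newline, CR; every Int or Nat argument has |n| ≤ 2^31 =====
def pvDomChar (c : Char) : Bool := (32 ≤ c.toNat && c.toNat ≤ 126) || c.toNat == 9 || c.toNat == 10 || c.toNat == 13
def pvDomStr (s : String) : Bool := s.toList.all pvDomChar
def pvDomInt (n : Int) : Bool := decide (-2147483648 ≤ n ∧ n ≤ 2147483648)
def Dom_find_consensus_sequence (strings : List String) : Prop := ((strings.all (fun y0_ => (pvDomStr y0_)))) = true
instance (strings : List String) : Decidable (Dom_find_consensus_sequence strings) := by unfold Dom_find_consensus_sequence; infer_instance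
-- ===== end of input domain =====

-- B replaces A's column-major loop (re-scan all padded strings and build a fresh dict per position)
-- by a single row-major pass maintaining one count dict per column; objective: alternative.

-- ===== PORT A =====
-- max(len(s) for s in strings)
def aMaxLen (strings : List String) : Nat :=
  (PySem.List.max? (strings.map (fun s => s.toList.length)) (fun x => x)).getD 0

-- s.ljust(m, '_')
def aLjust (s : List Char) (m : Nat) : List Char := s ++ List.replicate (m - s.length) '_'

-- the char_counts loop: char_counts[ch] = char_counts.get(ch, 0) + 1
def aCounts (col : List Char) : PySem.Dict Char Int :=
  col.foldl (fun d ch => d.insert ch (d.getD ch 0 + 1)) PySem.Dict.empty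

def find_consensus_sequence (strings : List String) : String × List Int :=
  if strings = [] then ("", [])
  else
    let maxLen := aMaxLen strings
    let padded := strings.map (fun s => aLjust s.toList maxLen)
    let res := (List.range maxLen).foldl (fun acc pos =>
        -- s[pos]; exact: every padded string has length maxLen and pos < maxLen
        let chars := padded.map (fun s => s.getD pos '_')
        let counts := aCounts chars
        let mostCommon := ((PySem.List.max? counts.items (fun p => p.2)).getD ('_', 0)).1
        (acc.1 ++ [mostCommon],
         if (PySem.Set.ofList chars).length > 1 then acc.2 ++ [(pos : Int)] else acc.2))
      (([] : List Char), ([] : List Int))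
    (String.ofList res.1, res.2)

-- ===== PORT B =====
-- max(map(len, strings))
def bMaxLen (strings : List String) : Nat :=
  (PySem.List.max? (strings.map (fun s => s.toList.length)) (fun x => x)).getD 0

-- d[ch] = d.get(ch, 0) + 1
def bTally (d : PySem.Dict Char Int) (ch : Char) : PySem.Dict Char Int :=
  d.insert ch (d.getD ch 0 + 1)

def find_consensus_sequence_alt (strings : List String) : String × List Int :=
  if strings = [] then ("", [])
  else
    let maxLen := bMaxLen strings
    -- for s in strings: for i, ch in enumerate(s.ljust(max_len, '_')): counts[i][ch] += 1
    let counts := strings.foldl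
        (fun cnts s => List.zipWith bTally cnts (s.toList ++ List.replicate (maxLen - s.toList.length) '_'))
        (List.replicate maxLen PySem.Dict.empty)
    -- ''.join(max(d, key=d.get) for d in counts)
    let consensus := counts.map (fun d => (PySem.List.max? d.keys (fun k => d.getD k 0)).getD '_')
    -- [i for i, d in enumerate(counts) if len(d) > 1]
    let varPos := (PySem.List.enumerate counts).foldl
        (fun acc p => if p.2.size > 1 then acc ++ [p.1] else acc) ([] : List Int)
    (String.ofList consensus, varPos)

-- ===== PRECONDITION & SPEC =====
def Spec_find_consensus_sequence (strings : List String) (out : String × List Int) : Prop := out = find_consensus_sequence_alt strings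
instance (strings : List String) (out : String × List Int) : Decidable (Spec_find_consensus_sequence strings out) := by unfold Spec_find_consensus_sequence; infer_instance

-- ===== CLAIM (what is proved, stated in full; the proofs are below) =====
def Claim_equal_find_consensus_sequence : Prop := ∀ (strings : List String), Dom_find_consensus_sequence strings → Spec_find_consensus_sequence strings (find_consensus_sequence strings)

-- ===== LEMMAS AND PROOFS =====

-- max over a mapped list, against max over the original list with a composed key
theorem pv_max?_aux {α β κ : Type} [LT κ] [DecidableLT κ] (f : α → β) (key : β → κ) (l : List α) :
    ∀ (acc : Option α),
    Option.map f (l.foldl (fun acc x => match acc with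
      | none => some x
      | some m => if key (f m) < key (f x) then some x else some m) acc)
    = (l.map f).foldl (fun acc x => match acc with
      | none => some x
      | some m => if key m < key x then some x else some m) (Option.map f acc) := by
  induction l with
  | nil => intro acc; simp
  | cons x t ih =>
    intro acc
    cases acc with
    | none => simpa using ih (some x)
    | some m =>
      by_cases h : key (f m) < key (f x)
      · simpa [h] using ih (some x)
      · simpa [h] using ih (some m)

theorem pv_max?_map {α β κ : Type} [LT κ] [DecidableLT κ] (f : α → β) (key : β → κ) (l : List α) :
    PySem.List.max? (l.map f) key = (PySem.List.max? l (fun a => key (f a))).map f := by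
  unfold PySem.List.max?
  exact (pv_max?_aux f key l none).symm

-- enumerate over a mapped list
theorem pv_enumerate_map {α β : Type} (g : α → β) (xs : List α) (s : Int) :
    PySem.List.enumerate (xs.map g) s = (PySem.List.enumerate xs s).map (fun p => (p.1, g p.2)) := by
  induction xs generalizing s with
  | nil => simp [PySem.List.enumerate_nil]
  | cons x t ih => simp [PySem.List.enumerate_cons, ih]

-- enumerate of List.range
theorem pv_enumerate_range (m : Nat) :
    PySem.List.enumerate (List.range m) 0 = (List.range m).map (fun i : Nat => ((i : Int), i)) := by
  induction m with
  | zero => simp [PySem.List.enumerate_nil]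
  | succ n ih =>
    rw [List.range_succ, PySem.List.enumerate_append, ih]
    simp [PySem.List.enumerate_cons, PySem.List.enumerate_nil]

-- row-major fold of per-column tallies = column-major tally per position
theorem pv_fold_zip (m : Nat) (rows : List (List Char)) :
    ∀ (init : List (PySem.Dict Char Int)), (∀ r ∈ rows, r.length = m) → init.length = m →
    rows.foldl (fun acc r => List.zipWith bTally acc r) init
      = (List.range m).map (fun i =>
          (rows.map (fun r => r.getD i '_')).foldl bTally (init.getD i PySem.Dict.empty)) := by
  induction rows with
  | nil =>
    intro init _ hlen
    simp only [List.foldl_nil, List.map_nil]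
    apply List.ext_getElem
    · simp [hlen]
    · intro i h1 h2
      simp only [List.getElem_map, List.getElem_range]
      rw [List.getD_eq_getElem _ _ (by omega)]
  | cons r t ih =>
    intro init hr hlen
    have hrlen : r.length = m := hr r (by simp)
    have hzlen : (List.zipWith bTally init r).length = m := by simp [hlen, hrlen]
    rw [List.foldl_cons, ih _ (fun x hx => hr x (by simp [hx])) hzlen]
    apply List.map_congr_left
    intro i hi
    have him : i < m := List.mem_range.mp hi
    have hstep : (List.zipWith bTally init r).getD i PySem.Dict.empty
        = bTally (init.getD i PySem.Dict.empty) (r.getD i '_') := by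
      rw [List.getD_eq_getElem _ _ (by omega), List.getElem_zipWith,
          List.getD_eq_getElem _ _ (by omega), List.getD_eq_getElem _ _ (by omega)]
    rw [hstep]
    simp

-- consensus char of a column: B's max over keys = A's max over items
theorem pv_consensus_col (col : List Char) :
    (PySem.List.max? (aCounts col).keys (fun k => (aCounts col).getD k 0)).getD '_'
      = ((PySem.List.max? (aCounts col).items (fun p => p.2)).getD ('_', 0)).1 := by
  have hnd : (aCounts col).keys.Nodup :=
    PySem.Dict.nodup_keys_foldl_insert col _ PySem.Dict.empty (by simp [PySem.Dict.keys_empty])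
  have hitems := PySem.Dict.items_eq_map_keys (aCounts col) hnd 0
  rw [hitems, pv_max?_map (fun k => (k, (aCounts col).getD k 0)) (fun p => p.2)]
  cases h : PySem.List.max? (aCounts col).keys (fun k => (aCounts col).getD k 0) with
  | none => simp
  | some k => simp

-- len(d) for the column tally dict = len(set(column))
theorem pv_size_col (col : List Char) :
    (aCounts col).size = (PySem.Set.ofList col).length := by
  have hk : (aCounts col).keys = PySem.Set.ofList col := by
    rw [aCounts, PySem.Dict.keys_foldl_insert]
    simp [PySem.Set.ofList_eq_foldl, PySem.Set.update, PySem.Dict.keys_empty]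
  have hsz : (aCounts col).keys.length = (aCounts col).size := by
    simp [PySem.Dict.keys, PySem.Dict.size]
  rw [← hsz, hk]

-- ===== VERDICT (by name: the statement is the Claim_ definition above) =====
theorem find_consensus_sequence_spec : Claim_equal_find_consensus_sequence := by
  intro strings _
  unfold Spec_find_consensus_sequence
  by_cases hnil : strings = []
  · subst hnil; rfl
  · unfold find_consensus_sequence find_consensus_sequence_alt
    rw [if_neg hnil, if_neg hnil]
    dsimp only
    have hbm : bMaxLen strings = aMaxLen strings := rfl
    rw [hbm]
    set m := aMaxLen strings with hm
    set padded := strings.map (fun s => aLjust s.toList m) with hpadded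
    -- every padded string has length exactly m
    have hlen : ∀ r ∈ padded, r.length = m := by
      intro r hr
      rw [hpadded] at hr
      obtain ⟨s, hs, rfl⟩ := List.mem_map.mp hr
      have hle : s.toList.length ≤ m := by
        cases h : PySem.List.max? (strings.map fun s => s.toList.length) (fun x => x) with
        | none =>
          exact absurd (by simpa [hnil] using (PySem.List.max?_eq_none_iff _ _).mp h) hnil
        | some v =>
          have := PySem.List.max?_isMax h _ (List.mem_map_of_mem (f := fun s => s.toList.length) hs)
          simp only [hm, aMaxLen, h, Option.getD_some]
          exact this
      rw [aLjust]
      simp only [List.length_append, List.length_replicate]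
      omega
    -- B's padding is A's padding
    have hbpad : (fun (cnts : List (PySem.Dict Char Int)) (s : String) =>
          List.zipWith bTally cnts (s.toList ++ List.replicate (m - s.toList.length) '_'))
        = (fun cnts s => List.zipWith bTally cnts (aLjust s.toList m)) := by
      funext cnts s; rw [aLjust]
    -- B's counts list, column by column
    have hcounts : strings.foldl
          (fun cnts s => List.zipWith bTally cnts (s.toList ++ List.replicate (m - s.toList.length) '_'))
          (List.replicate m PySem.Dict.empty)
        = (List.range m).map (fun i => aCounts (padded.map (fun r => r.getD i '_'))) := by
      rw [hbpad]
      have hfold : strings.foldl (fun cnts s => List.zipWith bTally cnts (aLjust s.toList m))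
            (List.replicate m PySem.Dict.empty)
          = padded.foldl (fun acc r => List.zipWith bTally acc r) (List.replicate m PySem.Dict.empty) := by
        rw [hpadded, List.foldl_map]
      rw [hfold, pv_fold_zip m padded _ hlen (by simp)]
      apply List.map_congr_left
      intro i hi
      have him : i < m := List.mem_range.mp hi
      have hinit : (List.replicate m (PySem.Dict.empty (κ := Char) (ν := Int))).getD i PySem.Dict.empty
          = PySem.Dict.empty := by
        rw [List.getD_eq_getElem _ _ (by simpa using him), List.getElem_replicate]
      rw [hinit, aCounts]
      rfl
    rw [hcounts]
    -- split A's paired fold into its two components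
    rw [PySem.List.foldl_prod_mk
        (f := fun (acc : List Char) (pos : Nat) =>
          acc ++ [((PySem.List.max? (aCounts (padded.map (fun s => s.getD pos '_'))).items
                    (fun p => p.2)).getD ('_', 0)).1])
        (g := fun (acc : List Int) (pos : Nat) =>
          if (PySem.Set.ofList (padded.map (fun s => s.getD pos '_'))).length > 1
          then acc ++ [(pos : Int)] else acc)]
    refine congrArg₂ Prod.mk ?_ ?_
    · -- consensus strings agree
      rw [PySem.List.foldl_append_singleton_eq_map, List.nil_append, List.map_map]
      refine congrArg String.ofList (List.map_congr_left ?_)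
      intro i _
      exact (pv_consensus_col (padded.map (fun s => s.getD i '_'))).symm
    · -- variable positions agree
      rw [pv_enumerate_map, pv_enumerate_range, List.map_map, List.foldl_map]
      dsimp only [Function.comp_apply]
      apply PySem.List.foldl_congr_mem
      intro acc pos _
      simp only [pv_size_col]
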